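-- pv_equiv track=rewrite | github.com/sinscrit/jpk-railway-deploy | j2j_v3_converter/j2j/generators/jpk_transformation_converter.py | _get_parent_paths
-- ===== SOURCE A (Python) =====
-- from typing import Dict, List, Any, Optional
--
-- def _get_parent_paths(target_path: str) -> List[str]:
--     """
--     Extract all parent paths from a target path.
--
--     Args:
--         target_path: Full target path (e.g., "upsertList/record/Contact/externalId")
--
--     Returns:
--         List of parent paths sorted by depth (shortest first)
--         e.g., ["upsertList", "upsertList/record", "upsertList/record/Contact"]
--     """
--     if not target_path:
--         return []
--
--     segments = target_path.split('/')
--     parent_paths = []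
--
--     # Build all parent paths (exclude the final element which is the field)
--     for i in range(1, len(segments)):
--         parent_path = '/'.join(segments[:i])
--         parent_paths.append(parent_path)
--
--     return parent_paths
-- ===== SOURCE B (Python) =====
-- from typing import List
--
--
-- def _get_parent_paths(target_path: str) -> List[str]:
--     """Incremental version: maintain a running prefix instead of re-joining a slice each iteration."""
--     if not target_path:
--         return []
--
--     segments = target_path.split('/')
--     parent_paths = []
--     running = segments[0]
--     for seg in segments[1:]:
--         parent_paths.append(running)
--         running = running + '/' + seg
--     return parent_paths
-- ===== Notes on version B (the rewrite author's own statement) =====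
-- stated objective: alternative
-- what changed: Replaces the per-iteration separator-join of a fresh slice segments[:i] over an index range with a single pass over the segment list that maintains a running prefix string extended by one segment per step.
import Mathlib
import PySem

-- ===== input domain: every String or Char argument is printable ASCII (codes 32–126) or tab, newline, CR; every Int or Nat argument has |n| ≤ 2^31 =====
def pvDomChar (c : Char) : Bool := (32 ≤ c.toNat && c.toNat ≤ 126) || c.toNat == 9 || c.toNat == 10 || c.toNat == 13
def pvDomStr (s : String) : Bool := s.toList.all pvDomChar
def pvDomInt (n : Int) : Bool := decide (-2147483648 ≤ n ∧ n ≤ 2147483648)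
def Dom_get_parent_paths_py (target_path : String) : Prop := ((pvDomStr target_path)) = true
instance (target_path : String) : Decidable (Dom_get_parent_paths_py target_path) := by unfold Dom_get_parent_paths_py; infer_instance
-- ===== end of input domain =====

-- B replaces A's per-iteration join of a fresh slice by one pass keeping a running prefix; alternative decomposition, no speed claim.

-- ===== PORT A =====
-- '/'.join(segments[:i]) for i in range(1, len(segments)), after the empty-path guard
def get_parent_paths_py (target_path : String) : List String :=
  if target_path = "" then []
  else
    let segments := (PySem.Str.split? target_path "/").getD []   -- sep "/" ≠ "", so split? is always some
    (PySem.List.pyRange 1 (segments.length : Int) 1).foldl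
      (fun acc i => acc ++ [PySem.Str.join "/" (PySem.List.slice segments none (some i))]) []

-- ===== PORT B =====
-- one fold over the tail of the segment list, state = (output so far, running prefix)
def get_parent_paths_py_alt (target_path : String) : List String :=
  if target_path = "" then []
  else
    match (PySem.Str.split? target_path "/").getD [] with
    | [] => []   -- unreachable: split of a nonempty string is nonempty
    | s0 :: rest =>
      (rest.foldl (fun (st : List String × String) seg =>
        (st.1 ++ [st.2], st.2 ++ "/" ++ seg)) (([] : List String), s0)).1

-- ===== PRECONDITION & SPEC =====
def Spec_get_parent_paths_py (target_path : String) (out : List String) : Prop := out = get_parent_paths_py_alt target_path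
instance (target_path : String) (out : List String) : Decidable (Spec_get_parent_paths_py target_path out) := by unfold Spec_get_parent_paths_py; infer_instance

-- ===== CLAIM (what is proved, stated in full; the proofs are below) =====
def Claim_equal_get_parent_paths_py : Prop := ∀ (target_path : String), Dom_get_parent_paths_py target_path → Spec_get_parent_paths_py target_path (get_parent_paths_py target_path)

-- ===== LEMMAS AND PROOFS =====

-- the list of running prefixes B's fold emits, as a standalone recursion
def pvEmit (run : String) : List String → List String
  | [] => []
  | s :: t => run :: pvEmit (run ++ "/" ++ s) t

theorem pvFoldl_eq_emit (rest : List String) : ∀ (acc : List String) (run : String),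
    (rest.foldl (fun (st : List String × String) seg =>
      (st.1 ++ [st.2], st.2 ++ "/" ++ seg)) (acc, run)).1 = acc ++ pvEmit run rest := by
  induction rest with
  | nil => intro acc run; simp [pvEmit]
  | cons s t ih => intro acc run; simp [List.foldl, pvEmit, ih, List.append_assoc]

-- merging the first two parts into the separator-joined head does not change a join
theorem pvJoin_merge (a b : String) (l : List String) :
    PySem.Str.join "/" (a :: b :: l) = PySem.Str.join "/" ((a ++ "/" ++ b) :: l) := by
  apply String.toList_inj.mp
  cases l with
  | nil =>
    simp [PySem.Str.toList_join, PySem.Chars.join_cons_cons, PySem.Chars.join_singleton,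
      String.toList_append]
  | cons c l' =>
    simp [PySem.Str.toList_join, PySem.Chars.join_cons_cons, String.toList_append,
      List.append_assoc]

theorem pvJoin_single (a : String) : PySem.Str.join "/" [a] = a := by
  apply String.toList_inj.mp
  simp [PySem.Str.toList_join, PySem.Chars.join_singleton]

-- A's k-th prefix join equals B's k-th running prefix
theorem pvMap_take_eq_emit (rest : List String) : ∀ (s0 : String),
    (List.range rest.length).map
      (fun k => PySem.Str.join "/" ((s0 :: rest).take (k + 1))) = pvEmit s0 rest := by
  induction rest with
  | nil => intro s0; simp [pvEmit]
  | cons r t ih =>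
    intro s0
    rw [List.length_cons, List.range_succ_eq_map]
    simp only [List.map_cons, List.map_map]
    rw [pvEmit]
    congr 1
    · simpa using pvJoin_single s0
    · rw [← ih (s0 ++ "/" ++ r)]
      apply List.map_congr_left
      intro k _
      simp only [Function.comp, List.take_succ_cons]
      exact pvJoin_merge s0 r (t.take k)

-- A's range-indexed slices are the takes of the segment list
theorem pvA_eq_map (segs : List String) :
    (PySem.List.pyRange 1 (segs.length : Int) 1).foldl
      (fun acc i => acc ++ [PySem.Str.join "/" (PySem.List.slice segs none (some i))]) []
    = (List.range (segs.length - 1)).map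
        (fun k => PySem.Str.join "/" (segs.take (k + 1))) := by
  rw [PySem.List.foldl_append_singleton_eq_map, PySem.List.pyRange_one]
  have hn : ((segs.length : Int) - 1).toNat = segs.length - 1 := by omega
  rw [hn, List.map_map]
  apply List.map_congr_left
  intro k _
  have : (1 : Int) + (k : Int) = ((k + 1 : Nat) : Int) := by push_cast; ring
  simp only [Function.comp, this, PySem.List.slice_to_natCast]

-- ===== VERDICT (by name: the statement is the Claim_ definition above) =====
theorem get_parent_paths_py_spec : Claim_equal_get_parent_paths_py := by
  intro target_path _
  unfold Spec_get_parent_paths_py get_parent_paths_py get_parent_paths_py_alt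
  by_cases h : target_path = ""
  · simp [h]
  · simp only [h, if_false]
    cases hs : (PySem.Str.split? target_path "/").getD [] with
    | nil => simp
    | cons s0 rest =>
      show _ = (rest.foldl (fun (st : List String × String) seg =>
        (st.1 ++ [st.2], st.2 ++ "/" ++ seg)) (([] : List String), s0)).1
      rw [pvFoldl_eq_emit, List.nil_append, pvA_eq_map, ← pvMap_take_eq_emit rest s0]
      simp
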